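-- pv_equiv track=rewrite | github.com/Juancabarrera26/Implemetacion-AFD | AFD.py | procesar_cadena
-- ===== SOURCE A (Python) =====
-- def procesar_cadena(linea_archivo):
--     cadena = linea_archivo.strip()
--
--     if not cadena:
--         return False
--
--     estado = 'q1'
--
--     for char in cadena:
--         if estado == 'q1':
--             if char == '0':
--                 estado = 'q2'
--             elif char == '1':
--                 estado = 'q3'
--             else:
--                 return False
--
--         elif estado == 'q2':
--             if char == '0' or char == '1':
--                 estado = 'q2'
--
--         elif estado == 'q3':
--             if char == '0' or char == '1':
--                 estado = 'q3'
--
--     return estado == 'q2'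
-- ===== SOURCE B (Python) =====
-- def procesar_cadena(linea_archivo):
--     return linea_archivo.strip().startswith('0')
-- ===== Notes on version B (the rewrite author's own statement) =====
-- stated objective: simpler
-- what changed: Replaces the character-by-character DFA simulation (state variable, loop over all characters) with a single constant-time check of the stripped string's first character, since states q2/q3 are absorbing.
import Mathlib
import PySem

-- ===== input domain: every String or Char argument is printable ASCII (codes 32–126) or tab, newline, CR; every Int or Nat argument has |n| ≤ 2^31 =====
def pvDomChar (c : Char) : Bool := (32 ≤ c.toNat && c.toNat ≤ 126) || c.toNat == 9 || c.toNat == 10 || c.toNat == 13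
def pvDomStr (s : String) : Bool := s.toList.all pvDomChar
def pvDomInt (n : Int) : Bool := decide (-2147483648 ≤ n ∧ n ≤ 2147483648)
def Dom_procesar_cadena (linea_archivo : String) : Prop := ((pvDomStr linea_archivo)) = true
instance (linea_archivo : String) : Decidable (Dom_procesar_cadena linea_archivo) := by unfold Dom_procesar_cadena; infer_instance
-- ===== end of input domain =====

-- B replaces A's character-by-character DFA simulation with a single first-character
-- check of the stripped string (objective: simpler; the absorbing states q2/q3 make
-- the rest of the string irrelevant).

-- ===== PORT A =====
-- the for-loop over the characters, with the early `return False` and the state string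
def pvLoopA : List Char → String → Bool
  | [], estado => estado == "q2"
  | c :: cs, estado =>
    if estado == "q1" then
      if c == '0' then pvLoopA cs "q2"
      else if c == '1' then pvLoopA cs "q3"
      else false
    else if estado == "q2" then
      if c == '0' || c == '1' then pvLoopA cs "q2"
      else pvLoopA cs estado
    else if estado == "q3" then
      if c == '0' || c == '1' then pvLoopA cs "q3"
      else pvLoopA cs estado
    else pvLoopA cs estado

def procesar_cadena (linea_archivo : String) : Bool :=
  let cadena := PySem.Str.strip linea_archivo
  if cadena.toList == [] then false
  else pvLoopA cadena.toList "q1"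

-- ===== PORT B =====
def procesar_cadena_alt (linea_archivo : String) : Bool :=
  PySem.Str.startswith (PySem.Str.strip linea_archivo) "0"

-- ===== PRECONDITION & SPEC =====
def Spec_procesar_cadena (linea_archivo : String) (out : Bool) : Prop := out = procesar_cadena_alt linea_archivo
instance (linea_archivo : String) (out : Bool) : Decidable (Spec_procesar_cadena linea_archivo out) := by unfold Spec_procesar_cadena; infer_instance

-- ===== CLAIM (what is proved, stated in full; the proofs are below) =====
def Claim_equal_procesar_cadena : Prop := ∀ (linea_archivo : String), Dom_procesar_cadena linea_archivo → Spec_procesar_cadena linea_archivo (procesar_cadena linea_archivo)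

-- ===== LEMMAS AND PROOFS =====
-- q2 is absorbing and accepting: the loop returns true from state "q2" on any suffix
theorem pvLoopA_q2 (cs : List Char) : pvLoopA cs "q2" = true := by
  induction cs with
  | nil => rfl
  | cons c cs ih => simp [pvLoopA, ih]

-- q3 is absorbing and rejecting: the loop returns false from state "q3" on any suffix
theorem pvLoopA_q3 (cs : List Char) : pvLoopA cs "q3" = false := by
  induction cs with
  | nil => rfl
  | cons c cs ih => simp [pvLoopA, ih]

-- from the start state, the loop's answer is exactly "first character is '0'"
theorem pvLoopA_q1 (c : Char) (cs : List Char) :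
    pvLoopA (c :: cs) "q1" = (c == '0') := by
  by_cases h0 : c = '0'
  · simp [pvLoopA, h0, pvLoopA_q2]
  · by_cases h1 : c = '1'
    · simp [pvLoopA, h1, pvLoopA_q3]
    · simp [pvLoopA, h0, h1]

theorem pvStartswith_zero (l : List Char) :
    PySem.Chars.startswith l ['0'] = (match l with | [] => false | c :: _ => c == '0') := by
  cases l <;> simp [PySem.Chars.startswith, List.isPrefixOf, eq_comm]

-- ===== VERDICT (by name: the statement is the Claim_ definition above) =====
theorem procesar_cadena_spec : Claim_equal_procesar_cadena := by
  intro s _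
  unfold Spec_procesar_cadena procesar_cadena procesar_cadena_alt
  simp only [PySem.Str.startswith_eq]
  cases h : (PySem.Str.strip s).toList with
  | nil => simp [pvStartswith_zero]
  | cons c cs => simp [pvStartswith_zero, pvLoopA_q1]
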